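-- pv_equiv track=rewrite | github.com/juanauli/Inversion-Sequences-Consecutive-Patterns-of-Relations | count_consec_ineq3.py | count_neq_neq
-- ===== SOURCE A (Python) =====
-- def count_neq_neq(sequence):
--     index = 0
--     counter = 0
--     while index < len(sequence) - 2:
--         if sequence[index] != sequence[index + 1] != sequence[index + 2]:
--             counter += 1
--         index += 1
--     return counter
-- ===== SOURCE B (Python) =====
-- def count_neq_neq(sequence):
--     # Run-length encode the sequence; a triple (i,i+1,i+2) has both adjacent
--     # inequalities exactly when position i+1 is a run of length 1 that is
--     # neither the first nor the last run.  So count interior singleton runs.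
--     runs = []
--     for x in sequence:
--         if runs and runs[-1][0] == x:
--             runs[-1][1] += 1
--         else:
--             runs.append([x, 1])
--     return sum(1 for _, length in runs[1:-1] if length == 1)
-- ===== Notes on version B (the rewrite author's own statement) =====
-- stated objective: alternative
-- what changed: Replaces A's index loop over triples by a run-length encoding of the sequence followed by counting interior runs of length 1, which is exactly the set of middle positions of triples with both adjacent inequalities.
import Mathlib
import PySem

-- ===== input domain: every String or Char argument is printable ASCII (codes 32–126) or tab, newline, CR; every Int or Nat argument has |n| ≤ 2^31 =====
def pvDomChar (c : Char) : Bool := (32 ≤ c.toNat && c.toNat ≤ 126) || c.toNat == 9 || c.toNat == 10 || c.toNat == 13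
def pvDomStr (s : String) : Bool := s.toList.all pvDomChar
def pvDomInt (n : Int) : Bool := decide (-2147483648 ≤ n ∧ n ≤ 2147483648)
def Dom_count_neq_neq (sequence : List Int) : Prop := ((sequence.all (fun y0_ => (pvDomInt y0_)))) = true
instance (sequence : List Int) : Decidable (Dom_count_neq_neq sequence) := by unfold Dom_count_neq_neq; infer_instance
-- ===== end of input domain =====

-- B replaces A's triple-reading index loop by a run-length encoding of the sequence,
-- counting interior runs of length 1 (objective: alternative algorithm, same cost).

-- ===== PORT A =====
-- while index < len(sequence) - 2: …  (indices accessed are always in range, so List.getD is exact)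
def countLoopA (s : List Int) (index counter : Int) : Int :=
  if index < (s.length : Int) - 2 then
    countLoopA s (index + 1)
      (if s.getD index.toNat 0 ≠ s.getD (index + 1).toNat 0 ∧
          s.getD (index + 1).toNat 0 ≠ s.getD (index + 2).toNat 0
       then counter + 1 else counter)
  else counter
termination_by ((s.length : Int) - 2 - index).toNat
decreasing_by omega

def count_neq_neq (sequence : List Int) : Int := countLoopA sequence 0 0

-- ===== PORT B =====
-- the body of B's for-loop: extend the run list with one element
-- (runs[-1][1] += 1 is the in-place update of the last run)
def runStep (runs : List (Int × Int)) (x : Int) : List (Int × Int) :=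
  match runs.getLast? with
  | some (v, c) => if v = x then runs.dropLast ++ [(v, c + 1)] else runs ++ [(x, 1)]
  | none => [(x, 1)]

-- sum(1 for _, length in runs[1:-1] if length == 1)
def count_neq_neq_alt (sequence : List Int) : Int :=
  let runs := sequence.foldl runStep []
  (((runs.drop 1).dropLast.filter (fun r => r.2 == 1)).length : Int)

-- ===== PRECONDITION & SPEC =====
def Spec_count_neq_neq (sequence : List Int) (out : Int) : Prop := out = count_neq_neq_alt sequence
instance (sequence : List Int) (out : Int) : Decidable (Spec_count_neq_neq sequence out) := by unfold Spec_count_neq_neq; infer_instance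

-- ===== CLAIM (what is proved, stated in full; the proofs are below) =====
def Claim_equal_count_neq_neq : Prop := ∀ (sequence : List Int), Dom_count_neq_neq sequence → Spec_count_neq_neq sequence (count_neq_neq sequence)

-- ===== LEMMAS AND PROOFS =====

-- structural count of triples with both adjacent inequalities (reference for both ports)
def C : List Int → Int
  | a :: b :: c :: t => (if a ≠ b ∧ b ≠ c then 1 else 0) + C (b :: c :: t)
  | _ => 0

theorem C_short (l : List Int) (h : l.length ≤ 2) : C l = 0 := by
  match l with
  | [] => rfl
  | [_] => rfl
  | [_, _] => rfl
  | _ :: _ :: _ :: _ => simp at h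

theorem loop_eq (s : List Int) (index counter : Int) (h0 : 0 ≤ index) :
    countLoopA s index counter = counter + C (s.drop index.toNat) := by
  rw [countLoopA]
  split
  · rename_i h
    have h3 : index.toNat + 3 ≤ s.length := by omega
    have hd : s.drop index.toNat =
        s[index.toNat] :: s[index.toNat + 1] :: s[index.toNat + 2] :: s.drop (index.toNat + 3) := by
      rw [List.drop_eq_getElem_cons (by omega), List.drop_eq_getElem_cons (by omega),
          List.drop_eq_getElem_cons (by omega)]
      norm_num
    have hd1 : s.drop (index + 1).toNat =
        s[index.toNat + 1] :: s[index.toNat + 2] :: s.drop (index.toNat + 3) := by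
      have : (index + 1).toNat = index.toNat + 1 := by omega
      rw [this, List.drop_eq_getElem_cons (by omega), List.drop_eq_getElem_cons (by omega)]
      norm_num
    have e1 : (index + 1).toNat = index.toNat + 1 := by omega
    have e2 : (index + 2).toNat = index.toNat + 2 := by omega
    rw [loop_eq s (index + 1) _ (by omega), hd1, hd, C, e1, e2,
        List.getD_eq_getElem s 0 (by omega), List.getD_eq_getElem s 0 (by omega),
        List.getD_eq_getElem s 0 (by omega)]
    split <;> omega
  · rename_i h
    rw [C_short _ (by simp; omega)]
    omega
termination_by ((s.length : Int) - 2 - index).toNat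
decreasing_by omega

-- head-recursive run-length encoding (proof-side reference for B's left fold)
def runsR : List Int → List (Int × Int)
  | [] => []
  | x :: t =>
    match runsR t with
    | (v, c) :: r => if v = x then (x, c + 1) :: r else (x, 1) :: (v, c) :: r
    | [] => [(x, 1)]

theorem runsR_cons (x : Int) (t : List Int) :
    runsR (x :: t) =
      match runsR t with
      | (v, c) :: r => if v = x then (x, c + 1) :: r else (x, 1) :: (v, c) :: r
      | [] => [(x, 1)] := rfl

theorem runsR_shape (t : List Int) : ∀ x : Int, ∃ k r, runsR (x :: t) = (x, k) :: r ∧ 1 ≤ k := by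
  induction t with
  | nil => intro x; exact ⟨1, [], rfl, le_refl 1⟩
  | cons y t' ih =>
    intro x
    obtain ⟨k, r, h, hk⟩ := ih y
    by_cases hxy : y = x
    · exact ⟨k + 1, r, by rw [runsR_cons, h]; simp [hxy], by omega⟩
    · exact ⟨1, (y, k) :: r, by rw [runsR_cons, h]; simp [hxy], le_refl 1⟩

theorem runStep_cons (p : Int × Int) (r : List (Int × Int)) (hr : r ≠ []) (x : Int) :
    runStep (p :: r) x = p :: runStep r x := by
  obtain ⟨q, r', rfl⟩ : ∃ q r', r = q :: r' := by
    cases r with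
    | nil => simp at hr
    | cons q r' => exact ⟨q, r', rfl⟩
  unfold runStep
  rw [List.getLast?_cons_cons]
  cases hL : (q :: r').getLast? with
  | none => simp at hL
  | some vc =>
    obtain ⟨v, c⟩ := vc
    split
    · split <;> rfl
    · simp_all

theorem runsR_snoc (p : List Int) (x : Int) : runsR (p ++ [x]) = runStep (runsR p) x := by
  induction p with
  | nil => rfl
  | cons y q ih =>
    cases q with
    | nil =>
      show runsR [y, x] = runStep (runsR [y]) x
      by_cases h : x = y
      · simp [runsR, runStep, h]
      · have h' : ¬ (y = x) := fun hh => h hh.symm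
        simp [runsR, runStep, h, h']
    | cons z q' =>
      obtain ⟨k, r0, hzq, hk⟩ := runsR_shape q' z
      have lhs : runsR ((y :: z :: q') ++ [x]) =
          match runStep (runsR (z :: q')) x with
          | (v, c) :: r => if v = y then (y, c + 1) :: r else (y, 1) :: (v, c) :: r
          | [] => [(y, 1)] := by
        rw [List.cons_append, runsR_cons, ih]
      by_cases hzy : z = y
      · subst hzy
        have hy : runsR (z :: z :: q') = (z, k + 1) :: r0 := by
          rw [runsR_cons, hzq]; simp
        rw [lhs, hy, hzq]
        cases hr0 : r0 with
        | nil =>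
          subst hr0
          by_cases hx : z = x <;> simp [runStep, hx]
        | cons p0 r0' =>
          subst hr0
          rw [runStep_cons (z, k) _ (by simp) x, runStep_cons (z, k + 1) _ (by simp) x]
          simp
      · have hzy' : ¬ (z = y) := hzy
        have hy : runsR (y :: z :: q') = (y, 1) :: (z, k) :: r0 := by
          rw [runsR_cons, hzq]; simp [hzy']
        rw [lhs, hy, hzq, runStep_cons (y, 1) _ (by simp) x]
        obtain ⟨c', r', hcr⟩ : ∃ c' r', runStep ((z, k) :: r0) x = (z, c') :: r' := by
          cases hr0 : r0 with
          | nil =>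
            by_cases hx : z = x
            · exact ⟨k + 1, [], by simp [runStep, hx]⟩
            · exact ⟨k, [(x, 1)], by simp [runStep, hx]⟩
          | cons p0 r0' =>
            exact ⟨k, runStep (p0 :: r0') x, by rw [runStep_cons _ _ (by simp) x]⟩
        rw [hcr]
        simp [hzy']

theorem fold_runsR (s : List Int) : s.foldl runStep [] = runsR s := by
  induction s using List.reverseRecOn with
  | nil => rfl
  | append_singleton p x ih => rw [List.foldl_append, List.foldl_cons, List.foldl_nil, ih, runsR_snoc]

-- count of singleton runs, last run excluded
def J (r : List (Int × Int)) : Int := ((r.dropLast.filter (fun p => p.2 == 1)).length : Int)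

theorem C_eq_head (a b : Int) (t : List Int) (h : a = b) : C (a :: b :: t) = C (b :: t) := by
  match t with
  | [] => rfl
  | c :: t' => rw [C]; simp [h]

theorem J_cons_big (b k : Int) (r : List (Int × Int)) (hk : 2 ≤ k) : J ((b, k) :: r) = J r := by
  match r with
  | [] => rfl
  | p :: r' =>
    unfold J
    rw [List.dropLast_cons_of_ne_nil (by simp)]
    have hne : ((b, k).2 == 1) = false := by simp; omega
    simp [hne]

theorem J_runsR (t : List Int) : ∀ a : Int, J ((runsR (a :: t)).tail) = C (a :: t) := by
  induction t with
  | nil => intro a; rfl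
  | cons b t' ih =>
    intro a
    obtain ⟨k, r0, hb, hk⟩ := runsR_shape t' b
    by_cases hab : a = b
    · subst hab
      have hy : runsR (a :: a :: t') = (a, k + 1) :: r0 := by
        rw [runsR_cons, hb]; simp
      rw [hy, List.tail_cons, C_eq_head a a t' rfl]
      have h2 := ih a
      rw [hb, List.tail_cons] at h2
      exact h2
    · have hba : ¬ (b = a) := fun h => hab h.symm
      have hy : runsR (a :: b :: t') = (a, 1) :: (b, k) :: r0 := by
        rw [runsR_cons, hb]; simp [hba]
      rw [hy, List.tail_cons]
      cases ht' : t' with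
      | nil =>
        subst ht'
        have hb1 : runsR [b] = [(b, 1)] := rfl
        rw [hb1] at hb
        cases hb
        rfl
      | cons c t'' =>
        subst ht'
        obtain ⟨k2, r2, hc, hk2⟩ := runsR_shape t'' c
        have hihb := ih b
        rw [hb, List.tail_cons] at hihb
        have hC : C (a :: b :: c :: t'') = (if b ≠ c then 1 else 0) + C (b :: c :: t'') := by
          rw [C]
          by_cases hbc : b = c <;> simp [hab, hbc]
        rw [hC]
        by_cases hbc : b = c
        · -- merged run: k = k2 + 1 ≥ 2, r0 = r2
          have hm : runsR (b :: c :: t'') = (b, k2 + 1) :: r2 := by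
            rw [runsR_cons, hc]; simp [hbc]
          rw [hm] at hb
          injection hb with h1 h2
          injection h1 with _ hkk
          subst h2
          subst hkk
          rw [J_cons_big b (k2 + 1) _ (by omega), hihb]
          simp [hbc]
        · have hcb : ¬ (c = b) := fun h => hbc h.symm
          have hm : runsR (b :: c :: t'') = (b, 1) :: (c, k2) :: r2 := by
            rw [runsR_cons, hc]; simp [hcb]
          rw [hm] at hb
          injection hb with h1 h2
          injection h1 with _ hkk
          subst h2
          subst hkk
          unfold J
          rw [List.dropLast_cons_of_ne_nil (by simp)]
          simp only [List.filter_cons]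
          unfold J at hihb
          simp [hbc]
          omega

theorem alt_eq_C (s : List Int) : count_neq_neq_alt s = C s := by
  unfold count_neq_neq_alt
  rw [fold_runsR]
  match s with
  | [] => rfl
  | a :: t =>
    have h := J_runsR t a
    obtain ⟨k, r, hr, _⟩ := runsR_shape t a
    rw [hr] at h ⊢
    simpa [J, List.drop_one] using h

-- ===== VERDICT (by name: the statement is the Claim_ definition above) =====
theorem count_neq_neq_spec : Claim_equal_count_neq_neq := by
  intro s _
  show countLoopA s 0 0 = count_neq_neq_alt s
  rw [loop_eq s 0 0 (by omega), alt_eq_C]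
  simp
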